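-- pv_equiv track=rewrite | github.com/davidbhan/practice | hackerrank/artificial_intelligence/bot_clean.py | shift_to_human_readable
-- ===== SOURCE A (Python) =====
-- def shift_to_human_readable(shift_x, shift_y):
--     output = ''
--
--     while(shift_x != 0):
--         if shift_x > 0:
--             output += 'RIGHT\n'
--             shift_x -= 1
--         else:
--             output += 'LEFT\n'
--             shift_x += 1
--
--     while(shift_y != 0):
--         if shift_y > 0:
--             output += 'UP\n'
--             shift_y -= 1
--         else:
--             output += 'DOWN\n'
--             shift_y += 1
--
--     output += 'CLEAN\n'
--
--     return output
-- ===== SOURCE B (Python) =====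
-- def shift_to_human_readable(shift_x, shift_y):
--     x_part = 'RIGHT\n' * shift_x if shift_x > 0 else 'LEFT\n' * -shift_x
--     y_part = 'UP\n' * shift_y if shift_y > 0 else 'DOWN\n' * -shift_y
--     return x_part + y_part + 'CLEAN\n'
-- ===== Notes on version B (the rewrite author's own statement) =====
-- stated objective: simpler
-- what changed: Replaced the two decrement-and-append while loops by a closed-form string repetition ('RIGHT\n'*shift_x etc.) concatenated in one expression.
import Mathlib
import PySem

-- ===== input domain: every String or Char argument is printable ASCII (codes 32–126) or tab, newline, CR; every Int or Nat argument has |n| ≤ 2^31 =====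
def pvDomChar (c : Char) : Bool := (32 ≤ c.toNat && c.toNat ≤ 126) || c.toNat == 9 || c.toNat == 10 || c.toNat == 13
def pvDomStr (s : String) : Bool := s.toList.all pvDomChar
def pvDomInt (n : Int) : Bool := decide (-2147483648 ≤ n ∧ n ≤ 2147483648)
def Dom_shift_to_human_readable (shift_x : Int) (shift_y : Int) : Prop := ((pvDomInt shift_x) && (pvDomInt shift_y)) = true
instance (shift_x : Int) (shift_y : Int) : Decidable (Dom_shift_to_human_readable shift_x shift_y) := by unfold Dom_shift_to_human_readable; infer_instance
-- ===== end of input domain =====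

-- ===== PORT A =====
-- B replaces A's two while loops by closed-form string repetition (simpler; return value only).

-- while(shift_x != 0): append 'RIGHT\n' or 'LEFT\n', stepping shift_x toward 0
def pvLoopX (shift_x : Int) (output : String) : String :=
  if shift_x = 0 then output
  else if shift_x > 0 then pvLoopX (shift_x - 1) (output ++ "RIGHT\n")
  else pvLoopX (shift_x + 1) (output ++ "LEFT\n")
termination_by shift_x.natAbs
decreasing_by all_goals omega

-- while(shift_y != 0): append 'UP\n' or 'DOWN\n', stepping shift_y toward 0
def pvLoopY (shift_y : Int) (output : String) : String :=
  if shift_y = 0 then output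
  else if shift_y > 0 then pvLoopY (shift_y - 1) (output ++ "UP\n")
  else pvLoopY (shift_y + 1) (output ++ "DOWN\n")
termination_by shift_y.natAbs
decreasing_by all_goals omega

def shift_to_human_readable (shift_x : Int) (shift_y : Int) : String :=
  pvLoopY shift_y (pvLoopX shift_x "") ++ "CLEAN\n"

-- ===== PORT B =====
-- 'str * n' (Python string repetition; "" for n ≤ 0)
def pvRep (s : String) (n : Int) : String :=
  match n with
  | Int.ofNat m => (List.replicate m s).foldl (· ++ ·) ""
  | Int.negSucc _ => ""

def shift_to_human_readable_alt (shift_x : Int) (shift_y : Int) : String :=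
  (if shift_x > 0 then pvRep "RIGHT\n" shift_x else pvRep "LEFT\n" (-shift_x)) ++
  (if shift_y > 0 then pvRep "UP\n" shift_y else pvRep "DOWN\n" (-shift_y)) ++
  "CLEAN\n"

-- ===== PRECONDITION & SPEC =====
def Spec_shift_to_human_readable (shift_x : Int) (shift_y : Int) (out : String) : Prop := out = shift_to_human_readable_alt shift_x shift_y
instance (shift_x : Int) (shift_y : Int) (out : String) : Decidable (Spec_shift_to_human_readable shift_x shift_y out) := by unfold Spec_shift_to_human_readable; infer_instance

-- ===== CLAIM (what is proved, stated in full; the proofs are below) =====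
def Claim_equal_shift_to_human_readable : Prop := ∀ (shift_x : Int) (shift_y : Int), Dom_shift_to_human_readable shift_x shift_y → Spec_shift_to_human_readable shift_x shift_y (shift_to_human_readable shift_x shift_y)

-- ===== LEMMAS AND PROOFS =====

theorem foldl_append_init (l : List String) : ∀ a : String,
    l.foldl (· ++ ·) a = a ++ l.foldl (· ++ ·) "" := by
  induction l with
  | nil => intro a; simp
  | cons h t ih =>
    intro a
    rw [List.foldl_cons, List.foldl_cons, ih (a ++ h), ih ("" ++ h),
      String.empty_append, String.append_assoc]

theorem pvRep_succ (s : String) (n : Nat) :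
    pvRep s ((n : Int) + 1) = s ++ pvRep s (n : Int) := by
  have h1 : ((n : Int) + 1) = (((n + 1 : Nat) : Int)) := by push_cast; ring
  rw [h1]
  show (List.replicate (n + 1) s).foldl (· ++ ·) "" = s ++ pvRep s (n : Int)
  rw [List.replicate_succ, List.foldl_cons, foldl_append_init, String.empty_append]
  rfl

theorem pvLoopX_eq (n : Nat) : ∀ (x : Int), x.natAbs = n → ∀ out : String,
    pvLoopX x out = out ++ (if x > 0 then pvRep "RIGHT\n" x else pvRep "LEFT\n" (-x)) := by
  induction n with
  | zero =>
    intro x hx out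
    have : x = 0 := by omega
    subst this
    simp [pvLoopX, pvRep]
  | succ k ih =>
    intro x hx out
    rw [pvLoopX]
    have hne : ¬ x = 0 := by omega
    by_cases hp : x > 0
    · simp only [hne, if_false, hp, if_true]
      rw [ih (x - 1) (by omega)]
      have hx1 : x = ((k : Int) + 1) := by omega
      by_cases hk : (0 : Int) < k
      · simp only [show x - 1 > 0 from by omega, if_true, hp, if_true]
        rw [hx1, pvRep_succ, show (k : Int) + 1 - 1 = (k : Int) from by ring,
          String.append_assoc]
      · have hk0 : (k : Int) = 0 := by omega
        simp only [show ¬ (x - 1 > 0) from by omega, if_false, hp, if_true]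
        rw [hx1, pvRep_succ, hk0]
        simp [pvRep, String.append_assoc]
    · have hn : x < 0 := by omega
      simp only [hne, if_false, hp, if_false]
      rw [ih (x + 1) (by omega)]
      have hx1 : -x = ((k : Int) + 1) := by omega
      have hp1 : ¬ (x + 1 > 0) := by omega
      simp only [hp1, if_false]
      rw [hx1, pvRep_succ, show -(x + 1) = (k : Int) from by omega, String.append_assoc]

theorem pvLoopY_eq (n : Nat) : ∀ (y : Int), y.natAbs = n → ∀ out : String,
    pvLoopY y out = out ++ (if y > 0 then pvRep "UP\n" y else pvRep "DOWN\n" (-y)) := by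
  induction n with
  | zero =>
    intro y hy out
    have : y = 0 := by omega
    subst this
    simp [pvLoopY, pvRep]
  | succ k ih =>
    intro y hy out
    rw [pvLoopY]
    have hne : ¬ y = 0 := by omega
    by_cases hp : y > 0
    · simp only [hne, if_false, hp, if_true]
      rw [ih (y - 1) (by omega)]
      have hy1 : y = ((k : Int) + 1) := by omega
      by_cases hk : (0 : Int) < k
      · simp only [show y - 1 > 0 from by omega, if_true, hp, if_true]
        rw [hy1, pvRep_succ, show (k : Int) + 1 - 1 = (k : Int) from by ring,
          String.append_assoc]
      · have hk0 : (k : Int) = 0 := by omega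
        simp only [show ¬ (y - 1 > 0) from by omega, if_false, hp, if_true]
        rw [hy1, pvRep_succ, hk0]
        simp [pvRep, String.append_assoc]
    · have hn : y < 0 := by omega
      simp only [hne, if_false, hp, if_false]
      rw [ih (y + 1) (by omega)]
      have hy1 : -y = ((k : Int) + 1) := by omega
      have hp1 : ¬ (y + 1 > 0) := by omega
      simp only [hp1, if_false]
      rw [hy1, pvRep_succ, show -(y + 1) = (k : Int) from by omega, String.append_assoc]

-- ===== VERDICT (by name: the statement is the Claim_ definition above) =====
theorem shift_to_human_readable_spec : Claim_equal_shift_to_human_readable := by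
  intro x y _
  unfold Spec_shift_to_human_readable shift_to_human_readable shift_to_human_readable_alt
  rw [pvLoopX_eq x.natAbs x rfl, pvLoopY_eq y.natAbs y rfl, String.empty_append,
    String.append_assoc]
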